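-- pv_equiv track=rewrite | github.com/sihyunjojo/algorithm | basic/py1.py | max_gravity_drop
-- ===== SOURCE A (Python) =====
-- def max_gravity_drop(arr):
--     gravity = [0] * len(arr[0])
--     max_drop = 0
--
--     for col in range(len(arr[0])):
--         for row in range(len(arr) - 1, -1, -1):
--             if arr[row][col] == 1:
--                 max_drop = max(max_drop, gravity[col])
--                 break  # 가장 아래에 있는 상자에 도달했으므로 더 이상 확인하지 않음
--             gravity[col] += 1
--
--     return max_drop
-- ===== SOURCE B (Python) =====
-- def max_gravity_drop(arr):
--     # One top-down pass: last[c] = row index of the bottommost 1 seen so far in column c.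
--     width = len(arr[0])
--     last = [None] * width
--     for r, row in enumerate(arr):
--         last = [r if row[c] == 1 else last[c] for c in range(width)]
--     n = len(arr)
--     best = 0
--     for l in last:
--         if l is not None:
--             best = max(best, n - 1 - l)
--     return best
-- ===== Notes on version B (the rewrite author's own statement) =====
-- stated objective: alternative
-- what changed: Replaces the per-column bottom-up scan with early break by a single top-down row pass maintaining a last-box-row table per column, followed by one pass over that table taking the max drop.
-- outside the precondition, e.g. on max_gravity_drop([[1, 1], [0], [1, 1]]): A returns 0, B raises IndexError
import Mathlib
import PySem

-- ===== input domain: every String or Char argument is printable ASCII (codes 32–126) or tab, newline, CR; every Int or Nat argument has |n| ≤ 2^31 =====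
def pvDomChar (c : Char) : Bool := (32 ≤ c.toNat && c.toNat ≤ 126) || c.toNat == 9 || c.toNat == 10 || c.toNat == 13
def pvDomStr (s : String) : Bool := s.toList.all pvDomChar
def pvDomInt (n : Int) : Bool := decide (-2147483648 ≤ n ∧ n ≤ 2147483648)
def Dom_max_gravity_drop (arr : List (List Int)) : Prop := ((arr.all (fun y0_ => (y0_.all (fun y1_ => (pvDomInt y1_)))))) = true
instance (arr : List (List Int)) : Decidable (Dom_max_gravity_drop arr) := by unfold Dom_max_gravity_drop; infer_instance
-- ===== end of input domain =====

-- B makes one top-down row pass maintaining a per-column last-box-row table instead of A's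
-- per-column bottom-up scans with early break; same cost, different traversal (alternative).

-- ===== PORT A =====
-- inner 'for row in range(len(arr)-1,-1,-1)' loop of A for one column; 'none' = IndexError
-- (excluded by Pre_); the per-column entry gravity[col] is the 'gravity' accumulator (it is
-- touched by no other column), and only max_drop survives the loop.
def aLoop (arr : List (List Int)) (col : Int) : List Int → Int → Int → Int
  | [], _, maxd => maxd
  | r :: rest, gravity, maxd =>
    match PySem.List.pyGet? arr r with
    | none => maxd  -- unreachable: r is a valid row index
    | some row =>
      match PySem.List.pyGet? row col with
      | none => maxd  -- IndexError in Python; excluded by Pre_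
      | some v => if v == 1 then max maxd gravity else aLoop arr col rest (gravity + 1) maxd

def max_gravity_drop (arr : List (List Int)) : Int :=
  let w := (arr.headD []).length  -- len(arr[0]); IndexError on [] excluded by Pre_
  (PySem.List.pyRange 0 (w : Int) 1).foldl
    (fun maxd col => aLoop arr col (PySem.List.pyRange ((arr.length : Int) - 1) (-1) (-1)) 0 maxd) 0

-- ===== PORT B =====
-- one row of B's top-down pass: last = [r if row[c] == 1 else last[c] for c in range(width)];
-- 'none' from row[c] = IndexError (excluded by Pre_)
def bStep (w : Nat) (last : List (Option Int)) (r : Int) (row : List Int) : List (Option Int) :=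
  (List.range w).map (fun (c : Nat) =>
    match PySem.List.pyGet? row (c : Int) with
    | some v => if v == 1 then some r else PySem.List.pyGetD last (c : Int) none
    | none => PySem.List.pyGetD last (c : Int) none)

def max_gravity_drop_alt (arr : List (List Int)) : Int :=
  let width := (arr.headD []).length  -- len(arr[0]); IndexError on [] excluded by Pre_
  let last := (PySem.List.enumerate arr).foldl (fun last p => bStep width last p.1 p.2)
                (List.replicate width (none : Option Int))
  let n : Int := arr.length
  last.foldl (fun best o => match o with | some l => max best (n - 1 - l) | none => best) 0

-- ===== PRECONDITION & SPEC =====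
-- A raises IndexError on [] (arr[0]) and on ragged grids where a column scan reaches a row
-- shorter than row 0.  Pre_ keeps the natural domain (nonempty, every row at least as long as
-- row 0); this slightly narrows: on a ragged grid whose short rows are all shielded below by a
-- box in every column A still returns (see cites), while B's full row pass raises there.
def Pre_max_gravity_drop (arr : List (List Int)) : Prop :=
  arr ≠ [] ∧ ∀ row ∈ arr, (arr.headD []).length ≤ row.length
instance (arr : List (List Int)) : Decidable (Pre_max_gravity_drop arr) := by
  unfold Pre_max_gravity_drop; infer_instance
def pvWitness_max_gravity_drop : List (List Int) := [[1, 0], [0, 1], [0, 0]]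

def Spec_max_gravity_drop (arr : List (List Int)) (out : Int) : Prop := out = max_gravity_drop_alt arr
instance (arr : List (List Int)) (out : Int) : Decidable (Spec_max_gravity_drop arr out) := by unfold Spec_max_gravity_drop; infer_instance

-- ===== CLAIM (what is proved, stated in full; the proofs are below) =====
def Claim_equal_max_gravity_drop : Prop := ∀ (arr : List (List Int)), Dom_max_gravity_drop arr → Pre_max_gravity_drop arr → Spec_max_gravity_drop arr (max_gravity_drop arr)

-- ===== LEMMAS AND PROOFS =====

-- the value arr[r][c] (total version used only in specs/proofs)
def valAt (arr : List (List Int)) (r c : Nat) : Int := (arr.getD r []).getD c 0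

-- F arr c m = index of the bottommost row r < m with arr[r][c] = 1, if any
def F (arr : List (List Int)) (c : Nat) : Nat → Option Nat
  | 0 => none
  | m + 1 => if valAt arr m c = 1 then some m else F arr c m

lemma valAt_append_lt (xs : List (List Int)) (row : List Int) (r c : Nat) (h : r < xs.length) :
    valAt (xs ++ [row]) r c = valAt xs r c := by
  simp [valAt, List.getD, List.getElem?_append_left h]

lemma valAt_append_self (xs : List (List Int)) (row : List Int) (c : Nat) :
    valAt (xs ++ [row]) xs.length c = row.getD c 0 := by
  simp [valAt, List.getD]

lemma F_append (xs : List (List Int)) (row : List Int) (c m : Nat) (hm : m ≤ xs.length) :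
    F (xs ++ [row]) c m = F xs c m := by
  induction m with
  | zero => rfl
  | succ k ih =>
    simp [F, valAt_append_lt xs row k c (by omega), ih (by omega)]

lemma aLoop_eq (arr : List (List Int)) (c : Nat) (hc : c < (arr.headD []).length)
    (hw : ∀ row ∈ arr, (arr.headD []).length ≤ row.length) :
    ∀ (m : Nat), m ≤ arr.length → ∀ (g maxd : Int),
      aLoop arr (c : Int) (PySem.List.pyRange ((m : Int) - 1) (-1) (-1)) g maxd
        = match F arr c m with
          | some r => max maxd (g + ((m : Int) - 1 - (r : Int)))
          | none => maxd := by
  intro m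
  induction m with
  | zero =>
    intro _ g maxd
    rw [PySem.List.pyRange_neg_one_eq_nil (by omega)]
    simp [aLoop, F]
  | succ k ih =>
    intro hm g maxd
    have hk : k < arr.length := by omega
    have hmem : arr.getD k [] ∈ arr := by
      rw [List.getD_eq_getElem arr [] hk]; exact List.getElem_mem hk
    have hlen : c < (arr.getD k []).length := lt_of_lt_of_le hc (hw _ hmem)
    have hrow : PySem.List.pyGet? arr (k : Int) = some (arr.getD k []) := by
      rw [PySem.List.pyGet?_natCast, List.getElem?_eq_getElem hk,
          List.getD_eq_getElem arr [] hk]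
    have hcell : PySem.List.pyGet? (arr.getD k []) (c : Int)
        = some ((arr.getD k []).getD c 0) := by
      rw [PySem.List.pyGet?_natCast, List.getElem?_eq_getElem hlen,
          List.getD_eq_getElem _ 0 hlen]
    rw [show ((k + 1 : Nat) : Int) - 1 = (k : Int) by push_cast; ring,
        PySem.List.pyRange_neg_one_cons (show (-1 : Int) < (k : Int) by omega)]
    simp only [aLoop, hrow, hcell]
    by_cases h1 : (arr.getD k []).getD c 0 = 1
    · simp only [F, valAt, h1, if_true, beq_self_eq_true]
      rw [sub_self, add_zero]
    · have hb : ((arr.getD k []).getD c 0 == 1) = false := beq_eq_false_iff_ne.mpr h1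
      rw [hb]
      simp only [Bool.false_eq_true, if_false]
      rw [ih (by omega) (g + 1) maxd]
      simp only [F, valAt, h1, if_false]
      cases F arr c k with
      | none => rfl
      | some r =>
        show max maxd (g + 1 + ((k : Int) - 1 - (r : Int)))
          = max maxd (g + ((k : Int) - (r : Int)))
        congr 1
        ring

lemma bStep_map (w : Nat) (row : List Int) (hrow : w ≤ row.length) (r : Int) (T : Nat → Option Int) :
    bStep w ((List.range w).map T) r row
      = (List.range w).map (fun c => if row.getD c 0 = 1 then some r else T c) := by
  unfold bStep
  apply List.map_congr_left
  intro c hc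
  have hcw : c < w := List.mem_range.mp hc
  have hcell : PySem.List.pyGet? row (c : Int) = some (row.getD c 0) := by
    rw [PySem.List.pyGet?_natCast, List.getElem?_eq_getElem (lt_of_lt_of_le hcw hrow),
        List.getD_eq_getElem _ 0 (lt_of_lt_of_le hcw hrow)]
  rw [hcell, PySem.List.pyGetD_natCast, PySem.List.getD_map_range T w c none hcw]
  by_cases h1 : row.getD c 0 = 1
  all_goals rw [List.getD_eq_getElem?_getD] at h1
  · simp [h1]
  · simp [h1]

lemma last_eq (arr : List (List Int)) (w : Nat)
    (hw : ∀ row ∈ arr, w ≤ row.length) :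
    (PySem.List.enumerate arr).foldl (fun last p => bStep w last p.1 p.2)
        (List.replicate w (none : Option Int))
      = (List.range w).map (fun c => (F arr c arr.length).map (fun r => (r : Int))) := by
  induction arr using List.reverseRecOn with
  | nil =>
    simp only [PySem.List.enumerate_nil, List.foldl_nil, List.length_nil]
    rw [show (fun c => (F [] c 0).map (fun r => (r : Int))) = Function.const Nat (none : Option Int)
          from funext fun c => rfl]
    rw [List.map_const, List.length_range]
  | append_singleton xs row ih =>
    have hw' : ∀ r ∈ xs, w ≤ r.length := fun r hr => hw r (List.mem_append_left _ hr)
    have hrow : w ≤ row.length := hw row (List.mem_append_right _ (List.mem_singleton_self row))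
    rw [PySem.List.enumerate_append, List.foldl_append, ih hw',
        PySem.List.enumerate_cons, PySem.List.enumerate_nil, List.foldl_cons, List.foldl_nil]
    rw [bStep_map w row hrow]
    apply List.map_congr_left
    intro c hc
    have hlen : (xs ++ [row]).length = xs.length + 1 := by simp
    rw [hlen]
    simp only [F, valAt_append_self xs row c, F_append xs row c xs.length le_rfl]
    by_cases h1 : row.getD c 0 = 1
    all_goals rw [List.getD_eq_getElem?_getD] at h1
    · simp [h1]
    · simp [h1]

lemma maxStep_eq (n : Int) (maxd : Int) (o : Option Nat) :
    (match (o.map (fun r => (r : Int))) with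
      | some l => max maxd (n - 1 - l)
      | none => maxd)
    = (match o with
      | some r => max maxd (0 + (n - 1 - (r : Int)))
      | none => maxd) := by
  cases o <;> simp

-- ===== VERDICT (by name: the statement is the Claim_ definition above) =====
theorem max_gravity_drop_spec : Claim_equal_max_gravity_drop := by
  unfold Claim_equal_max_gravity_drop
  intro arr _ hpre
  obtain ⟨hne, hw⟩ := hpre
  unfold Spec_max_gravity_drop max_gravity_drop max_gravity_drop_alt
  simp only []
  rw [last_eq arr (arr.headD []).length hw]
  rw [PySem.List.pyRange_zero_nat, List.foldl_map, List.foldl_map]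
  apply PySem.List.foldl_congr_mem
  intro maxd c hc
  have hcw : c < (arr.headD []).length := List.mem_range.mp hc
  rw [aLoop_eq arr c hcw hw arr.length le_rfl 0 maxd]
  exact (maxStep_eq (arr.length : Int) maxd (F arr c arr.length)).symm
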